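-- pv_equiv track=rewrite | github.com/cka304huk-m/my_teaching | 10/tasks/quiz/quiz.py | question_player
-- ===== SOURCE A (Python) =====
-- def question_player(dict_quest):
--     """Вопросы для игроков."""
--
--     # Вопросы 1 игроку.
--     dict_player1 = {}
--     # Вопросы 2 игроку.
--     dict_player2 = {}
--     # Перебираю словарь.
--     for k, v in dict_quest.items():
--         # Если длина словаря dict_player1 < 5.
--         if len(dict_player1) < 5:
--             # Сохраняю вопросы с ответами
--             # для 1 игрока.
--             dict_player1[k] = v
--         # Иначе.
--         else:
--             # Сохраняю вопросы с ответами
--             # для 2 игрока.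
--             dict_player2[k] = v
--
--     return dict_player1, dict_player2
-- ===== SOURCE B (Python) =====
-- def question_player(dict_quest):
--     """Вопросы для игроков."""
--     items = list(dict_quest.items())
--     return dict(items[:5]), dict(items[5:])
-- ===== Notes on version B (the rewrite author's own statement) =====
-- stated objective: idiomatic
-- what changed: B lists the items once and splits at the index-5 boundary with two slices, building each dict directly, instead of A's per-element loop that branches on the running length of the first dict.
import Mathlib
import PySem

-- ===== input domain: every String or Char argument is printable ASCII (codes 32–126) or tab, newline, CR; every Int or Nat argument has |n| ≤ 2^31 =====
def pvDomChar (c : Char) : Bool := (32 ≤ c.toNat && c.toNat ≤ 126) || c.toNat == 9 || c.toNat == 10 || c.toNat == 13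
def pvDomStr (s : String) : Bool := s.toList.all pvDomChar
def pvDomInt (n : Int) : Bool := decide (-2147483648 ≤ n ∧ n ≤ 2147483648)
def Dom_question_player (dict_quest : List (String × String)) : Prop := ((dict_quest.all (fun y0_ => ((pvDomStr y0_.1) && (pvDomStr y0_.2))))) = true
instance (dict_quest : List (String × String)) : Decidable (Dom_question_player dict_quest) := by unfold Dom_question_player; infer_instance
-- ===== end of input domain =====

-- B lists the items once and splits at the index-5 boundary with two slices (idiomatic), instead of A's per-element branch on the running size of the first dict.


-- ===== PORT A =====
-- the loop body: branch on the running size of dict_player1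
def qpStep (st : PySem.Dict String String × PySem.Dict String String) (kv : String × String) :
    PySem.Dict String String × PySem.Dict String String :=
  if st.1.size < 5 then (st.1.insert kv.1 kv.2, st.2) else (st.1, st.2.insert kv.1 kv.2)

def question_player (dict_quest : List (String × String)) : (List (String × String)) × (List (String × String)) :=
  let st := dict_quest.foldl qpStep (PySem.Dict.empty, PySem.Dict.empty)
  (st.1.items, st.2.items)

-- ===== PORT B =====
-- dict(pairs): fold insert over the pair list
def qpDictOf (ps : List (String × String)) : List (String × String) :=
  (ps.foldl (fun d kv => d.insert kv.1 kv.2) PySem.Dict.empty).items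

def question_player_alt (dict_quest : List (String × String)) : (List (String × String)) × (List (String × String)) :=
  let items := dict_quest
  (qpDictOf (PySem.List.slice items none (some 5)), qpDictOf (PySem.List.slice items (some 5) none))

-- ===== PRECONDITION & SPEC =====
-- Pre_ excludes association lists with duplicate keys: the Python function's input is a dict, which never has duplicate keys.
def Pre_question_player (dict_quest : List (String × String)) : Prop :=
  (dict_quest.map Prod.fst).Nodup
instance (dict_quest : List (String × String)) : Decidable (Pre_question_player dict_quest) := by unfold Pre_question_player; infer_instance
def pvWitness_question_player : (List (String × String)) :=
  [("q1", "a1"), ("q2", "a2"), ("q3", "a3"), ("q4", "a4"), ("q5", "a5"), ("q6", "a6")]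

def Spec_question_player (dict_quest : List (String × String)) (out : (List (String × String)) × (List (String × String))) : Prop := out = question_player_alt dict_quest
instance (dict_quest : List (String × String)) (out : (List (String × String)) × (List (String × String))) : Decidable (Spec_question_player dict_quest out) := by unfold Spec_question_player; infer_instance

-- ===== CLAIM (what is proved, stated in full; the proofs are below) =====
def Claim_equal_question_player : Prop := ∀ (dict_quest : List (String × String)), Dom_question_player dict_quest → Pre_question_player dict_quest → Spec_question_player dict_quest (question_player dict_quest)

-- ===== LEMMAS AND PROOFS =====

-- once dict_player1 is full, every remaining item goes into dict_player2
theorem qp_loop_full (l : List (String × String)) (d1 d2 : PySem.Dict String String)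
    (h : ¬ d1.size < 5) :
    l.foldl qpStep (d1, d2) = (d1, l.foldl (fun d kv => d.insert kv.1 kv.2) d2) := by
  induction l generalizing d2 with
  | nil => rfl
  | cons p rest ih =>
      simp only [List.foldl_cons, qpStep, if_neg h]
      exact ih _

-- the main loop invariant: with fresh, pairwise-distinct keys, A's loop fills d1 from
-- the first 5 - d1.size items and puts the remainder into a fresh second dict
theorem qp_loop_split (l : List (String × String)) (d1 : PySem.Dict String String)
    (hfresh : ∀ p ∈ l, d1.contains p.1 = false)
    (hnd : (l.map Prod.fst).Nodup)
    (hsz : d1.size ≤ 5) :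
    l.foldl qpStep (d1, PySem.Dict.empty) =
      ((l.take (5 - d1.size)).foldl (fun d kv => d.insert kv.1 kv.2) d1,
       (l.drop (5 - d1.size)).foldl (fun d kv => d.insert kv.1 kv.2) PySem.Dict.empty) := by
  induction l generalizing d1 with
  | nil => simp
  | cons p rest ih =>
      by_cases h5 : d1.size < 5
      · have hfp : d1.contains p.1 = false := hfresh p (by simp)
        have hsz' : (d1.insert p.1 p.2).size = d1.size + 1 := by
          rw [PySem.Dict.size_insert, if_neg (by simp [hfp])]
        have hfresh' : ∀ q ∈ rest, (d1.insert p.1 p.2).contains q.1 = false := by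
          intro q hq
          rw [PySem.Dict.contains_insert]
          have hne : q.1 ≠ p.1 := by
            simp only [List.map_cons, List.nodup_cons] at hnd
            intro he; exact hnd.1 (he ▸ List.mem_map_of_mem hq)
          simp [hne, hfresh q (List.mem_cons_of_mem _ hq)]
        have := ih (d1.insert p.1 p.2) hfresh'
          (by simpa using hnd.of_cons) (by omega)
        simp only [List.foldl_cons, qpStep, if_pos h5]
        rw [this, hsz']
        have htk : 5 - d1.size = (5 - (d1.size + 1)) + 1 := by omega
        rw [htk]
        simp [List.take_succ_cons, List.drop_succ_cons]
      · have hz : 5 - d1.size = 0 := by omega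
        simp only [List.foldl_cons, qpStep, if_neg h5, hz, List.take_zero, List.drop_zero]
        simp only [List.foldl_nil]
        exact qp_loop_full rest d1 _ h5

-- with pairwise-distinct keys, dict(pairs) re-lists exactly the pairs
theorem qpDictOf_eq (ps : List (String × String)) (hnd : (ps.map Prod.fst).Nodup) :
    qpDictOf ps = ps := by
  unfold qpDictOf
  rw [PySem.Dict.items_foldl_insert_fresh ps Prod.fst Prod.snd PySem.Dict.empty
      (fun a _ => PySem.Dict.contains_empty a.1) hnd]
  simp [PySem.Dict.empty]

-- ===== VERDICT (by name: the statement is the Claim_ definition above) =====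
theorem question_player_spec : Claim_equal_question_player := by
  intro dq _ hpre
  unfold Spec_question_player question_player question_player_alt
  have hsplit := qp_loop_split dq PySem.Dict.empty
    (fun p _ => PySem.Dict.contains_empty p.1) hpre (by simp)
  simp only [PySem.Dict.size_empty, Nat.sub_zero] at hsplit
  have hs1 : PySem.List.slice dq none (some 5) = dq.take 5 := by simp [pysem]
  have hs2 : PySem.List.slice dq (some 5) none = dq.drop 5 := by simp [pysem]
  have hnd1 : ((dq.take 5).map Prod.fst).Nodup := by
    rw [List.map_take]; exact hpre.sublist (List.take_sublist _ _)
  have hnd2 : ((dq.drop 5).map Prod.fst).Nodup := by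
    rw [List.map_drop]; exact hpre.sublist (List.drop_sublist _ _)
  simp only [hsplit, hs1, hs2]
  rw [show qpDictOf (dq.take 5) = dq.take 5 from qpDictOf_eq _ hnd1,
      show qpDictOf (dq.drop 5) = dq.drop 5 from qpDictOf_eq _ hnd2]
  rw [PySem.Dict.items_foldl_insert_fresh _ Prod.fst Prod.snd PySem.Dict.empty
      (fun a _ => PySem.Dict.contains_empty a.1) hnd1,
    PySem.Dict.items_foldl_insert_fresh _ Prod.fst Prod.snd PySem.Dict.empty
      (fun a _ => PySem.Dict.contains_empty a.1) hnd2]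
  simp [PySem.Dict.empty]
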